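-- pv_equiv track=rewrite | github.com/fred0m/Steam_Recommend | Steam_Recommend/Prog_GameRecommend.py | search
-- ===== SOURCE A (Python) =====
-- def search(data,g1,g2,g3,status):               #输入三个游戏g1、g2、g3
--     node = []
--     if status == 1:
--         for i in range(len(data)):
--             if g1 in data[i] and g2 in data[i] and g3 in data[i]:
--                 node.append(i)
--     if status == 2:
--         for i in range(len(data)):
--             if g1 in data[i] and g2 in data[i]:
--                 node.append(i)
--     if status == 3:
--         for i in range(len(data)):
--             if g1 in data[i] and g3 in data[i]:
--                 node.append(i)
--     if status == 4:
--         for i in range(len(data)):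
--             if g2 in data[i] and g3 in data[i]:
--                 node.append(i)
--     return node
-- ===== SOURCE B (Python) =====
-- def search(data, g1, g2, g3, status):
--     # Inverted-index approach: build the sorted posting list of row indices for
--     # each required game, then merge-intersect the sorted lists pairwise.
--     req = {1: (g1, g2, g3), 2: (g1, g2), 3: (g1, g3), 4: (g2, g3)}.get(status)
--     if req is None:
--         return []
--     acc = posting(data, req[0])
--     for g in req[1:]:
--         acc = intersect(acc, posting(data, g))
--     return acc
--
--
-- def posting(data, g):
--     return [i for i, row in enumerate(data) if g in row]
--
--
-- def intersect(xs, ys):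
--     # intersection of two strictly increasing lists, merge-style
--     if not xs or not ys:
--         return []
--     if xs[0] == ys[0]:
--         return [xs[0]] + intersect(xs[1:], ys[1:])
--     if xs[0] < ys[0]:
--         return intersect(xs[1:], ys)
--     return intersect(xs, ys[1:])
-- ===== Notes on version B (the rewrite author's own statement) =====
-- stated objective: alternative
-- what changed: Replaces A's four branch-specific scans testing membership conjunctions row by row with an inverted-index algorithm: build a sorted posting list of row indices per required game, then merge-intersect the sorted posting lists pairwise (unknown status is a table miss returning []).
import Mathlib
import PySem

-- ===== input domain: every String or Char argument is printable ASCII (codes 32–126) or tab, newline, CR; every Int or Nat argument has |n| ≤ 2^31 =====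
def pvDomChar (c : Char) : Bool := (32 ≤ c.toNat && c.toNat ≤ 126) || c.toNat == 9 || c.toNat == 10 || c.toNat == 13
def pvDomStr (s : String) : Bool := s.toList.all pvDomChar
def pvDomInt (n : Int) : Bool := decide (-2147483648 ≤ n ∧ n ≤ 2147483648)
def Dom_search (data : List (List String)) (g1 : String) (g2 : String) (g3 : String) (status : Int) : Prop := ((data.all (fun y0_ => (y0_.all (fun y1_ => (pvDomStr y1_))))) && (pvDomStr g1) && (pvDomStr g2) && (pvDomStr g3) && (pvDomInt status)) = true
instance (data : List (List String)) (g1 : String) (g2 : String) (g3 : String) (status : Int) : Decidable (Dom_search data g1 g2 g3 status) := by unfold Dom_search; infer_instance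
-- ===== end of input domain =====

-- B replaces A's four branch-specific scans by an inverted index: per-game sorted posting lists of row indices, merge-intersected pairwise (alternative algorithm, same asymptotic cost).


-- ===== PORT A =====
def search (data : List (List String)) (g1 : String) (g2 : String) (g3 : String) (status : Int) : List Int :=
  let node : List Int := []
  let node := if status = 1 then
      (PySem.List.pyRange 0 (data.length : Int) 1).foldl
        (fun n i => if ((PySem.List.pyGetD data i []).contains g1 && (PySem.List.pyGetD data i []).contains g2) && (PySem.List.pyGetD data i []).contains g3 then n ++ [i] else n) node
    else node
  let node := if status = 2 then
      (PySem.List.pyRange 0 (data.length : Int) 1).foldl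
        (fun n i => if (PySem.List.pyGetD data i []).contains g1 && (PySem.List.pyGetD data i []).contains g2 then n ++ [i] else n) node
    else node
  let node := if status = 3 then
      (PySem.List.pyRange 0 (data.length : Int) 1).foldl
        (fun n i => if (PySem.List.pyGetD data i []).contains g1 && (PySem.List.pyGetD data i []).contains g3 then n ++ [i] else n) node
    else node
  let node := if status = 4 then
      (PySem.List.pyRange 0 (data.length : Int) 1).foldl
        (fun n i => if (PySem.List.pyGetD data i []).contains g2 && (PySem.List.pyGetD data i []).contains g3 then n ++ [i] else n) node
    else node
  node

-- ===== PORT B =====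
-- posting(data, g): sorted list of row indices whose row contains g (inverted-index entry)
def pvPosting (data : List (List String)) (g : String) : List Int :=
  ((PySem.List.enumerate data).filter (fun p => p.2.contains g)).map (fun p => p.1)

-- intersect(xs, ys): merge-style intersection of two strictly increasing lists
def pvIntersect : List Int → List Int → List Int
  | [], _ => []
  | _ :: _, [] => []
  | x :: xs, y :: ys =>
    if x = y then x :: pvIntersect xs ys
    else if x < y then pvIntersect xs (y :: ys)
    else pvIntersect (x :: xs) ys
termination_by xs ys => xs.length + ys.length

def search_alt (data : List (List String)) (g1 : String) (g2 : String) (g3 : String) (status : Int) : List Int :=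
  let req : Option (List String) :=
    (PySem.Dict.ofList [((1:Int), [g1, g2, g3]), (2, [g1, g2]), (3, [g1, g3]), (4, [g2, g3])]).get? status
  match req with
  | none => []
  | some [] => []   -- unreachable: every table entry is nonempty (totality guard)
  | some (g :: gs) => gs.foldl (fun acc g' => pvIntersect acc (pvPosting data g')) (pvPosting data g)

-- ===== PRECONDITION & SPEC =====
def Spec_search (data : List (List String)) (g1 : String) (g2 : String) (g3 : String) (status : Int) (out : List Int) : Prop := out = search_alt data g1 g2 g3 status
instance (data : List (List String)) (g1 : String) (g2 : String) (g3 : String) (status : Int) (out : List Int) : Decidable (Spec_search data g1 g2 g3 status out) := by unfold Spec_search; infer_instance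

-- ===== CLAIM (what is proved, stated in full; the proofs are below) =====
def Claim_equal_search : Prop := ∀ (data : List (List String)) (g1 : String) (g2 : String) (g3 : String) (status : Int), Dom_search data g1 g2 g3 status → Spec_search data g1 g2 g3 status (search data g1 g2 g3 status)

-- ===== LEMMAS AND PROOFS =====

-- an inverted-index posting list is the filtered index range
theorem pvPosting_eq (data : List (List String)) (g : String) :
    pvPosting data g
      = (PySem.List.pyRange 0 (data.length : Int) 1).filter
          (fun j => (PySem.List.pyGetD data j []).contains g) := by
  unfold pvPosting
  rw [PySem.List.enumerate_eq_map_pyRange (d := [])]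
  simp [List.filter_map, Function.comp_def]

-- merge-intersection of strictly increasing lists is ordered membership filtering
theorem pvIntersect_eq_filter : ∀ (xs ys : List Int),
    xs.Pairwise (· < ·) → ys.Pairwise (· < ·) →
    pvIntersect xs ys = xs.filter (fun x => decide (x ∈ ys)) := by
  intro xs ys hxs hys
  fun_induction pvIntersect xs ys with
  | case1 ys => simp
  | case2 x xs => simp
  | case3 xs y ys ih =>
    rw [ih hxs.of_cons hys.of_cons, List.filter_cons]
    simp only [List.mem_cons, true_or, decide_true, if_pos]
    congr 1
    refine List.filter_congr ?_
    intro a ha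
    have hlt := (List.pairwise_cons.1 hxs).1 a ha
    have hne : a ≠ y := by omega
    simp [hne]
  | case4 x xs y ys hne hlt ih =>
    rw [ih hxs.of_cons hys, List.filter_cons]
    have hnm : x ∉ y :: ys := by
      simp only [List.mem_cons]
      push Not
      refine ⟨hne, fun hmem => ?_⟩
      have := (List.pairwise_cons.1 hys).1 x hmem
      omega
    simp [hnm]
  | case5 x xs y ys hne hnlt ih =>
    rw [ih hxs hys.of_cons]
    refine List.filter_congr ?_
    intro a ha
    have hax : x ≤ a := by
      rcases List.mem_cons.1 ha with h | h
      · omega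
      · have := (List.pairwise_cons.1 hxs).1 a h; omega
    have hay : a ≠ y := by omega
    simp [List.mem_cons, hay]

theorem inter_filter (R : List Int) (hR : R.Pairwise (· < ·)) (p q : Int → Bool) :
    pvIntersect (R.filter p) (R.filter q) = R.filter (fun x => p x && q x) := by
  rw [pvIntersect_eq_filter _ _ (hR.filter _) (hR.filter _), List.filter_filter]
  refine List.filter_congr ?_
  intro a ha
  by_cases hq : q a = true <;> simp [List.mem_filter, ha, hq]

-- ===== VERDICT (by name: the statement is the Claim_ definition above) =====
theorem search_spec : Claim_equal_search := by
  intro data g1 g2 g3 status _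
  unfold Spec_search search search_alt
  have hR := PySem.List.pairwise_lt_pyRange_one 0 (data.length : Int)
  by_cases h1 : status = 1
  · subst h1
    simp only [PySem.Dict.ofList, PySem.Dict.update, PySem.Dict.insert, PySem.Dict.contains,
      PySem.Dict.empty, PySem.Dict.get?, PySem.List.foldl_append_ite_eq_filter]
    norm_num
    rw [pvPosting_eq, pvPosting_eq, pvPosting_eq, inter_filter _ hR, inter_filter _ hR]
    simp
  · by_cases h2 : status = 2
    · subst h2
      simp only [PySem.Dict.ofList, PySem.Dict.update, PySem.Dict.insert, PySem.Dict.contains,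
        PySem.Dict.empty, PySem.Dict.get?, PySem.List.foldl_append_ite_eq_filter]
      norm_num
      rw [pvPosting_eq, pvPosting_eq, inter_filter _ hR]
      simp
    · by_cases h3 : status = 3
      · subst h3
        simp only [PySem.Dict.ofList, PySem.Dict.update, PySem.Dict.insert, PySem.Dict.contains,
          PySem.Dict.empty, PySem.Dict.get?, PySem.List.foldl_append_ite_eq_filter]
        norm_num
        rw [pvPosting_eq, pvPosting_eq, inter_filter _ hR]
        simp
      · by_cases h4 : status = 4
        · subst h4
          simp only [PySem.Dict.ofList, PySem.Dict.update, PySem.Dict.insert, PySem.Dict.contains,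
            PySem.Dict.empty, PySem.Dict.get?, PySem.List.foldl_append_ite_eq_filter]
          norm_num
          rw [pvPosting_eq, pvPosting_eq, inter_filter _ hR]
          simp
        · have e1 : ((1:Int) == status) = false := by simp [Ne.symm h1]
          have e2 : ((2:Int) == status) = false := by simp [Ne.symm h2]
          have e3 : ((3:Int) == status) = false := by simp [Ne.symm h3]
          have e4 : ((4:Int) == status) = false := by simp [Ne.symm h4]
          simp [PySem.Dict.ofList, PySem.Dict.update, PySem.Dict.insert, PySem.Dict.contains,
            PySem.Dict.empty, PySem.Dict.get?, e1, e2, e3, e4, h1, h2, h3, h4]
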